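-- pv_equiv track=rewrite | github.com/SrVladyslav/interviews_code | problem1.py | find_max_sum_3
-- ===== SOURCE A (Python) =====
-- def find_max_sum_3(numbers):
-- 	max1 = 0; max2 = 0
-- 	for i in numbers:					# O(n)
-- 		if i > max1:
-- 			max2 = max1
-- 			max1 = i
-- 		elif i > max2:
-- 			max2 = i
-- 	return max1 + max2 					# O(1)
-- ===== SOURCE B (Python) =====
-- def find_max_sum_3(numbers):
--     vals = sorted((x for x in numbers if x > 0), reverse=True)
--     return sum(vals[:2])
-- ===== Notes on version B (the rewrite author's own statement) =====
-- stated objective: simpler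
-- what changed: Replaces A's single-pass running-top-two state machine with filter-positives, sort descending, sum the first two (zero-padded by slicing).
import Mathlib
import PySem

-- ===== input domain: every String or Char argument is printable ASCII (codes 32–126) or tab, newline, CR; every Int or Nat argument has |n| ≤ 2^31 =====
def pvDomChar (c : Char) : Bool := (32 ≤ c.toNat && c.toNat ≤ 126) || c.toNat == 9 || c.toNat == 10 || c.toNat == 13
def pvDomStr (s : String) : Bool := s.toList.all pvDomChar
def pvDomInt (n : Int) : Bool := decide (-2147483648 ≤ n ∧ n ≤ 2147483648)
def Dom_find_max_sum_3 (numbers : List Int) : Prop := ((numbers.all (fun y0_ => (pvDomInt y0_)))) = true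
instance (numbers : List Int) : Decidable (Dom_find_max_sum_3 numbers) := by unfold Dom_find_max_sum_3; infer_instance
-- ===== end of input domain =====

-- B replaces A's single-pass running-top-two scan with filter-positives / sort-descending / sum-first-two (objective: simpler).

-- ===== PORT A =====
-- the loop body of A: update the running (max1, max2) pair with one element
def pvStep (s : Int × Int) (i : Int) : Int × Int :=
  if i > s.1 then (i, s.1) else if i > s.2 then (s.1, i) else s

def find_max_sum_3 (numbers : List Int) : Int :=
  let r := numbers.foldl pvStep (0, 0)
  r.1 + r.2

-- ===== PORT B =====
def find_max_sum_3_alt (numbers : List Int) : Int :=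
  let vals := PySem.List.sorted (numbers.filter (fun x => decide (x > 0))) (fun x => x) true
  (PySem.List.slice vals none (some 2)).sum

-- ===== PRECONDITION & SPEC =====
def Spec_find_max_sum_3 (numbers : List Int) (out : Int) : Prop := out = find_max_sum_3_alt numbers
instance (numbers : List Int) (out : Int) : Decidable (Spec_find_max_sum_3 numbers out) := by unfold Spec_find_max_sum_3; infer_instance

-- ===== CLAIM (what is proved, stated in full; the proofs are below) =====
def Claim_equal_find_max_sum_3 : Prop := ∀ (numbers : List Int), Dom_find_max_sum_3 numbers → Spec_find_max_sum_3 numbers (find_max_sum_3 numbers)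

-- ===== LEMMAS AND PROOFS =====

-- A's loop body is order-insensitive
theorem pvStep_comm (s : Int × Int) (i j : Int) :
    pvStep (pvStep s i) j = pvStep (pvStep s j) i := by
  rcases s with ⟨a, b⟩
  simp only [pvStep]
  split_ifs <;> simp_all [Prod.ext_iff] <;> omega

-- non-positive elements never change A's state (given the loop invariant 0 ≤ b ≤ a)
theorem pvStep_foldl_filter (l : List Int) (a b : Int) (hb : 0 ≤ b) (hba : b ≤ a) :
    List.foldl pvStep (a, b) l = List.foldl pvStep (a, b) (l.filter (fun x => decide (x > 0))) := by
  induction l generalizing a b with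
  | nil => rfl
  | cons x xs ih =>
    by_cases hx : x > 0
    · simp only [List.foldl_cons, List.filter_cons, hx, decide_true, if_true]
      simp only [pvStep]
      split_ifs with h1 h2
      · exact ih x a (by omega) (le_of_lt h1)
      · exact ih a x (le_of_lt hx) (by omega)
      · exact ih a b hb hba
    · simp only [List.foldl_cons, List.filter_cons, hx, decide_false]
      have hfix : pvStep (a, b) x = (a, b) := by
        simp only [pvStep]; split_ifs <;> first | omega | rfl
      rw [hfix]
      exact ih a b hb hba

-- elements below the running second maximum leave A's state fixed
theorem pvStep_foldl_const (l : List Int) (a b : Int) (hba : b ≤ a)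
    (h : ∀ x ∈ l, x ≤ b) :
    List.foldl pvStep (a, b) l = (a, b) := by
  induction l with
  | nil => rfl
  | cons x xs ih =>
    have hx : x ≤ b := h x (List.mem_cons_self ..)
    have hfix : pvStep (a, b) x = (a, b) := by
      simp only [pvStep]; split_ifs <;> first | omega | rfl
    simp only [List.foldl_cons, hfix]
    exact ih (fun y hy => h y (List.mem_cons_of_mem _ hy))

theorem pv_slice_two (vals : List Int) :
    PySem.List.slice vals none (some 2) = vals.take 2 := by
  simpa using PySem.List.slice_to_natCast vals 2

-- on a descending list of positive numbers, A's fold captures exactly the first two elements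
theorem pvStep_foldl_sorted (S : List Int) (hpos : ∀ x ∈ S, 0 < x)
    (hpw : S.Pairwise (fun a b => b ≤ a)) :
    (S.foldl pvStep (0, 0)).1 + (S.foldl pvStep (0, 0)).2 = (S.take 2).sum := by
  match S with
  | [] => simp
  | [p] =>
    have hp : 0 < p := hpos p (by simp)
    simp only [List.foldl_cons, List.foldl_nil, pvStep]
    rw [if_pos (by simpa using hp)]
    simp
  | p :: q :: rest =>
    have hp : 0 < p := hpos p (by simp)
    have hq : 0 < q := hpos q (by simp)
    have hqp : q ≤ p := (List.pairwise_cons.mp hpw).1 q (by simp)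
    have hrest : ∀ x ∈ rest, x ≤ q :=
      (List.pairwise_cons.mp (List.pairwise_cons.mp hpw).2).1
    simp only [List.foldl_cons]
    have h1 : pvStep (0, 0) p = (p, 0) := by
      simp only [pvStep]; rw [if_pos (by simpa using hp)]
    have h2 : pvStep (p, 0) q = (p, q) := by
      simp only [pvStep]
      rw [if_neg (by simp; omega), if_pos (by simpa using hq)]
    rw [h1, h2, pvStep_foldl_const rest p q (by omega) hrest]
    simp

-- ===== VERDICT (by name: the statement is the Claim_ definition above) =====
theorem find_max_sum_3_spec : Claim_equal_find_max_sum_3 := by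
  intro numbers _
  unfold Spec_find_max_sum_3 find_max_sum_3 find_max_sum_3_alt
  show (List.foldl pvStep (0, 0) numbers).1 + (List.foldl pvStep (0, 0) numbers).2
      = (PySem.List.slice (PySem.List.sorted (numbers.filter (fun x => decide (x > 0))) (fun x => x) true) none (some 2)).sum
  rw [pv_slice_two]
  have h1 : numbers.foldl pvStep (0, 0)
      = (numbers.filter (fun x => decide (x > 0))).foldl pvStep (0, 0) :=
    pvStep_foldl_filter numbers 0 0 le_rfl le_rfl
  have hperm : (numbers.filter (fun x => decide (x > 0))).Perm
      (PySem.List.sorted (numbers.filter (fun x => decide (x > 0))) (fun x => x) true) :=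
    (PySem.List.sorted_perm ..).symm
  have h2 := hperm.foldl_eq' (fun x _ y _ z => pvStep_comm z x y) ((0 : Int), (0 : Int))
  have hpos : ∀ x ∈ PySem.List.sorted (numbers.filter (fun x => decide (x > 0))) (fun x => x) true, 0 < x := by
    intro x hx
    have := (PySem.List.mem_sorted ..).mp hx
    simpa using (List.mem_filter.mp this).2
  have hpw := PySem.List.sorted_pairwise_rev (numbers.filter (fun x => decide (x > 0))) (fun x => x)
  have := pvStep_foldl_sorted _ hpos hpw
  rw [h1, h2]
  exact this
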